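-- pv_equiv track=rewrite | github.com/SVCE-ACM/A-December-of-Algorithms-2021 | December-07/python3_dsaghicha.py | no_building
-- ===== SOURCE A (Python) =====
-- def no_building(building_co: list[list[int]],axis: str, axis_no: int) -> list[int]:
--     axis_rep: int = 0 if (axis == 'x') else 1
--     success: int = 0
--
--     for i in range(len(building_co)):
--         lt: bool = False
--         gt: bool = False
--         for j in range(axis_rep, 6, 2):
--             if building_co[i][j] < axis_no:
--                 lt = True
--             elif building_co[i][j] > axis_no:
--                 gt = True
--
--         if lt and gt: success += 1
--
--     return success
-- ===== SOURCE B (Python) =====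
-- def no_building(building_co: list[list[int]], axis: str, axis_no: int) -> int:
--     k = 0 if axis == 'x' else 1
--     coords = [(row[k], row[k + 2], row[k + 4]) for row in building_co]
--     no_lt = sum(all(c >= axis_no for c in t) for t in coords)
--     no_gt = sum(all(c <= axis_no for c in t) for t in coords)
--     all_eq = sum(all(c == axis_no for c in t) for t in coords)
--     return len(coords) - no_lt - no_gt + all_eq
-- ===== Notes on version B (the rewrite author's own statement) =====
-- stated objective: alternative
-- what changed: Counts by inclusion-exclusion over three staged whole-list passes (rows with no coordinate below, rows with no coordinate above, rows all equal) instead of A's per-row lt/gt flag loop: result = n - no_lt - no_gt + all_eq.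
import Mathlib
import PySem

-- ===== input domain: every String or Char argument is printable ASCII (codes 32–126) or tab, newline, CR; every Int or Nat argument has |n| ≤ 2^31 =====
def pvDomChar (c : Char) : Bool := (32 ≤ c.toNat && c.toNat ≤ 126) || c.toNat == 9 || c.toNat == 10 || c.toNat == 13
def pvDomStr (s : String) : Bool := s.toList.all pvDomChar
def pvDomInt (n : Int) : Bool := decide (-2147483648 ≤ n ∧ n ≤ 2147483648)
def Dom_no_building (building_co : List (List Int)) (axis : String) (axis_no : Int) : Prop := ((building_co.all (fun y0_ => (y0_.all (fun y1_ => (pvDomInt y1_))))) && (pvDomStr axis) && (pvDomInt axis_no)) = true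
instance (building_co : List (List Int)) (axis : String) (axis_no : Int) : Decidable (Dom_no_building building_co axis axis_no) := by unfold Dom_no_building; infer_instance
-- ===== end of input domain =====

-- B counts by inclusion-exclusion over three staged passes (n - no_lt - no_gt + all_eq) instead of A's per-row lt/gt flag loop; alternative decomposition, same cost.
-- ===== PORT A =====
def no_building (building_co : List (List Int)) (axis : String) (axis_no : Int) : Int :=
  let axis_rep : Int := if axis = "x" then 0 else 1
  (PySem.List.pyRange 0 building_co.length 1).foldl (fun success i =>
    let row := PySem.List.pyGetD building_co i []
    let lg := (PySem.List.pyRange axis_rep 6 2).foldl (fun (lg : Bool × Bool) j =>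
      let v := PySem.List.pyGetD row j 0
      if v < axis_no then (true, lg.2)
      else if v > axis_no then (lg.1, true)
      else lg) (false, false)
    if lg.1 && lg.2 then success + 1 else success) 0

-- ===== PORT B =====
def no_building_alt (building_co : List (List Int)) (axis : String) (axis_no : Int) : Int :=
  let k : Int := if axis = "x" then 0 else 1
  let coords : List (Int × Int × Int) := building_co.map (fun row =>
    (PySem.List.pyGetD row k 0, PySem.List.pyGetD row (k + 2) 0, PySem.List.pyGetD row (k + 4) 0))
  let no_lt : Int := (coords.countP (fun t => t.1 ≥ axis_no && t.2.1 ≥ axis_no && t.2.2 ≥ axis_no) : Int)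
  let no_gt : Int := (coords.countP (fun t => t.1 ≤ axis_no && t.2.1 ≤ axis_no && t.2.2 ≤ axis_no) : Int)
  let all_eq : Int := (coords.countP (fun t => t.1 = axis_no && t.2.1 = axis_no && t.2.2 = axis_no) : Int)
  (coords.length : Int) - no_lt - no_gt + all_eq

-- ===== PRECONDITION & SPEC =====
-- Pre_ excludes exactly the inputs where Python A raises IndexError: some row too short for the
-- three coordinate reads at axis_rep, axis_rep+2, axis_rep+4.
def Pre_no_building (building_co : List (List Int)) (axis : String) (axis_no : Int) : Prop :=
  ∀ row ∈ building_co, (if axis = "x" then 5 else 6) ≤ row.length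
instance (building_co : List (List Int)) (axis : String) (axis_no : Int) : Decidable (Pre_no_building building_co axis axis_no) := by unfold Pre_no_building; infer_instance
def pvWitness_no_building : List (List Int) × String × Int := ([[0,0,0,0,0,3], [2,0,-1,0,5,0]], "y", 1)

def Spec_no_building (building_co : List (List Int)) (axis : String) (axis_no : Int) (out : Int) : Prop := out = no_building_alt building_co axis axis_no
instance (building_co : List (List Int)) (axis : String) (axis_no : Int) (out : Int) : Decidable (Spec_no_building building_co axis axis_no out) := by unfold Spec_no_building; infer_instance

-- ===== CLAIM (what is proved, stated in full; the proofs are below) =====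
def Claim_equal_no_building : Prop := ∀ (building_co : List (List Int)) (axis : String) (axis_no : Int), Dom_no_building building_co axis axis_no → Pre_no_building building_co axis axis_no → Spec_no_building building_co axis axis_no (no_building building_co axis axis_no)

-- ===== LEMMAS AND PROOFS =====

-- counting fold vs countP, for any per-row predicate
theorem pv_count (p : List Int → Bool) (bc : List (List Int)) : ∀ (acc : Int),
    bc.foldl (fun success row => if p row then success + 1 else success) acc
      = acc + ((bc.countP p : Nat) : Int) := by
  induction bc with
  | nil => intro acc; simp
  | cons row bc ih =>
    intro acc
    by_cases h : p row = true <;> simp [List.foldl, h, ih]; omega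

-- inclusion-exclusion over counts, generic in two Bool predicates on any type
theorem pv_incl_excl {α : Type} (q r : α → Bool) (l : List α) :
    l.countP (fun a => !q a && !r a) + l.countP q + l.countP r
      = l.length + l.countP (fun a => q a && r a) := by
  induction l with
  | nil => simp
  | cons a l ih =>
    simp only [List.countP_cons, List.length_cons]
    cases hq : q a <;> cases hr : r a <;> simp [hq, hr] <;> omega

-- main bridge: A's index-loop with lt/gt flags equals B's inclusion-exclusion count, for offset k
theorem pv_main (n k : Int) (bc : List (List Int))
    (hr : PySem.List.pyRange k 6 2 = [k, k + 2, k + 4]) :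
    (PySem.List.pyRange 0 (bc.length : Int) 1).foldl
      (fun success i =>
        let row := PySem.List.pyGetD bc i []
        let lg := (PySem.List.pyRange k 6 2).foldl (fun (lg : Bool × Bool) j =>
          let v := PySem.List.pyGetD row j 0
          if v < n then (true, lg.2)
          else if v > n then (lg.1, true)
          else lg) (false, false)
        if lg.1 && lg.2 then success + 1 else success) 0
    = (let coords : List (Int × Int × Int) := bc.map (fun row =>
         (PySem.List.pyGetD row k 0, PySem.List.pyGetD row (k + 2) 0, PySem.List.pyGetD row (k + 4) 0));
       (coords.length : Int)
        - (coords.countP (fun t => t.1 ≥ n && t.2.1 ≥ n && t.2.2 ≥ n) : Int)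
        - (coords.countP (fun t => t.1 ≤ n && t.2.1 ≤ n && t.2.2 ≤ n) : Int)
        + (coords.countP (fun t => t.1 = n && t.2.1 = n && t.2.2 = n) : Int)) := by
  rw [hr]
  rw [PySem.List.foldl_pyRange_zero_pyGetD' bc []
      (fun success row =>
        let lg := ([k, k + 2, k + 4].foldl (fun (lg : Bool × Bool) j =>
          let v := PySem.List.pyGetD row j 0
          if v < n then (true, lg.2)
          else if v > n then (lg.1, true)
          else lg) (false, false))
        if lg.1 && lg.2 then success + 1 else success) 0]
  rw [pv_count]
  simp only [Int.zero_add, List.countP_map, List.length_map, Function.comp_def]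
  have key := pv_incl_excl
      (fun row => decide (PySem.List.pyGetD row k 0 ≥ n) &&
                  decide (PySem.List.pyGetD row (k + 2) 0 ≥ n) &&
                  decide (PySem.List.pyGetD row (k + 4) 0 ≥ n))
      (fun row => decide (PySem.List.pyGetD row k 0 ≤ n) &&
                  decide (PySem.List.pyGetD row (k + 2) 0 ≤ n) &&
                  decide (PySem.List.pyGetD row (k + 4) 0 ≤ n)) bc
  have hsame : bc.countP (fun row =>
        let lg := ([k, k + 2, k + 4].foldl (fun (lg : Bool × Bool) j =>
          let v := PySem.List.pyGetD row j 0
          if v < n then (true, lg.2)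
          else if v > n then (lg.1, true)
          else lg) (false, false))
        lg.1 && lg.2)
      = bc.countP (fun row =>
          !(decide (PySem.List.pyGetD row k 0 ≥ n) &&
            decide (PySem.List.pyGetD row (k + 2) 0 ≥ n) &&
            decide (PySem.List.pyGetD row (k + 4) 0 ≥ n)) &&
          !(decide (PySem.List.pyGetD row k 0 ≤ n) &&
            decide (PySem.List.pyGetD row (k + 2) 0 ≤ n) &&
            decide (PySem.List.pyGetD row (k + 4) 0 ≤ n))) := by
    apply List.countP_congr
    intro row _
    simp only [List.foldl]
    constructor <;> intro h <;> revert h <;> split_ifs <;> simp <;> omega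
  have heq : bc.countP (fun row =>
        decide (PySem.List.pyGetD row k 0 ≥ n) &&
        decide (PySem.List.pyGetD row (k + 2) 0 ≥ n) &&
        decide (PySem.List.pyGetD row (k + 4) 0 ≥ n) &&
        (decide (PySem.List.pyGetD row k 0 ≤ n) &&
         decide (PySem.List.pyGetD row (k + 2) 0 ≤ n) &&
         decide (PySem.List.pyGetD row (k + 4) 0 ≤ n)))
      = bc.countP (fun row =>
          decide (PySem.List.pyGetD row k 0 = n) &&
          decide (PySem.List.pyGetD row (k + 2) 0 = n) &&
          decide (PySem.List.pyGetD row (k + 4) 0 = n)) := by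
    apply List.countP_congr
    intro row _
    constructor <;> intro h <;> revert h <;> simp <;> omega
  simp only [hsame]
  omega

-- ===== VERDICT (by name: the statement is the Claim_ definition above) =====
theorem pvWitness_ok : Dom_no_building pvWitness_no_building.1 pvWitness_no_building.2.1 pvWitness_no_building.2.2 ∧ Pre_no_building pvWitness_no_building.1 pvWitness_no_building.2.1 pvWitness_no_building.2.2 := by decide

theorem no_building_spec : Claim_equal_no_building := by
  intro bc axis n _ _
  unfold Spec_no_building no_building no_building_alt
  by_cases hx : axis = "x"
  · simp only [hx, reduceIte]
    exact pv_main n 0 bc (by decide)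
  · simp only [hx, reduceIte]
    exact pv_main n 1 bc (by decide)
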